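-- pv_equiv track=rewrite | github.com/FelixWolf/libfurc | libfurc/base.py | b95decode
-- ===== SOURCE A (Python) =====
-- def b95decode(data):
--     out = 0
--     for c in data:
--         if c >= 32 and c < 127:
--             out = (out * 95) + (c - 32)
--         else:
--             raise ValueError("Invalid base95 character!")
--     return out
-- ===== SOURCE B (Python) =====
-- def b95decode(data):
--     for c in data:
--         if not (32 <= c and c < 127):
--             raise ValueError("Invalid base95 character!")
--     total = 0
--     power = 0 if not data else 95 ** (len(data) - 1)
--     for c in data:
--         total += (c - 32) * power
--         power //= 95
--     return total
-- ===== Notes on version B (the rewrite author's own statement) =====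
-- stated objective: alternative
-- what changed: B first validates all bytes left-to-right, then sums digits positionally with an explicit place-value weight starting at 95**(len-1) and divided by 95 each step, instead of A's single-pass Horner fold with validation interleaved.
import Mathlib
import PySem

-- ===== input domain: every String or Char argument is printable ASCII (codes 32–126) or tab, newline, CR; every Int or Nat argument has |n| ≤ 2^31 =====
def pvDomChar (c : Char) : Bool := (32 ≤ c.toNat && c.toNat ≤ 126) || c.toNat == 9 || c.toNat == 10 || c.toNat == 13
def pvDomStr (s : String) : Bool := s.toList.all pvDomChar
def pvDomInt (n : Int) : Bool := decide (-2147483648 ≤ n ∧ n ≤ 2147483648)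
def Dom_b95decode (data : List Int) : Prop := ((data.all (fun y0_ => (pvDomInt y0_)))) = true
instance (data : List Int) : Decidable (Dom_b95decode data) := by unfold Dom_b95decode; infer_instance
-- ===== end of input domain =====

-- B validates all bytes first, then sums digits with an explicit place-value weight (95^(n-1), divided by 95 each step) instead of A's interleaved Horner fold; same value everywhere A returns.

-- ===== PORT A =====
-- A's loop: Horner accumulation; 'none' marks the ValueError on an invalid byte.
def b95decodeAux (out : Int) : List Int → Option Int
  | [] => some out
  | c :: rest =>
    if c ≥ 32 ∧ c < 127 then b95decodeAux (out * 95 + (c - 32)) rest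
    else none

def b95decode (data : List Int) : Int := (b95decodeAux 0 data).getD 0

-- ===== PORT B =====
-- validation pass, then the weighted sum with power //= 95 each step
def b95decode_alt (data : List Int) : Int :=
  if data.all (fun c => decide (32 ≤ c ∧ c < 127)) then
    (data.foldl (fun (s : Int × Int) c => (s.1 + (c - 32) * s.2, PySem.Int.floordiv s.2 95))
      (0, if data.isEmpty then 0 else (95 : Int) ^ (data.length - 1))).1
  else 0

-- ===== PRECONDITION & SPEC =====
-- Pre_ excludes exactly the inputs on which A raises ValueError (a byte outside [32,127)).
def Pre_b95decode (data : List Int) : Prop := ∀ c ∈ data, 32 ≤ c ∧ c < 127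
instance (data : List Int) : Decidable (Pre_b95decode data) := by unfold Pre_b95decode; infer_instance
def pvWitness_b95decode : List Int := [33, 50, 126]

def Spec_b95decode (data : List Int) (out : Int) : Prop := out = b95decode_alt data
instance (data : List Int) (out : Int) : Decidable (Spec_b95decode data out) := by unfold Spec_b95decode; infer_instance

-- ===== CLAIM (what is proved, stated in full; the proofs are below) =====
def Claim_equal_b95decode : Prop := ∀ (data : List Int), Dom_b95decode data → Pre_b95decode data → Spec_b95decode data (b95decode data)

-- ===== LEMMAS AND PROOFS =====

-- clean positional value both ports are related to
def pvVal : List Int → Int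
  | [] => 0
  | c :: r => (c - 32) * (95 : Int) ^ r.length + pvVal r

theorem b95decodeAux_eq (l : List Int) : ∀ acc : Int, (∀ c ∈ l, 32 ≤ c ∧ c < 127) →
    b95decodeAux acc l = some (acc * (95 : Int) ^ l.length + pvVal l) := by
  induction l with
  | nil => intro acc _; simp [b95decodeAux, pvVal]
  | cons c r ih =>
    intro acc h
    have hc := h c (by simp)
    have hr : ∀ x ∈ r, 32 ≤ x ∧ x < 127 := fun x hx => h x (by simp [hx])
    simp only [b95decodeAux]
    rw [if_pos (show c ≥ 32 ∧ c < 127 from ⟨hc.1, hc.2⟩), ih _ hr]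
    simp only [pvVal, List.length_cons]
    congr 1
    ring

theorem foldl_pow_eq (l : List Int) : ∀ t : Int,
    (l.foldl (fun (s : Int × Int) c => (s.1 + (c - 32) * s.2, PySem.Int.floordiv s.2 95))
      (t, (95 : Int) ^ (l.length - 1))).1 = t + pvVal l := by
  induction l with
  | nil => intro t; simp [pvVal]
  | cons c r ih =>
    intro t
    cases r with
    | nil =>
      simp [pvVal, List.foldl]
    | cons d s =>
      have hp : PySem.Int.floordiv ((95 : Int) ^ ((c :: d :: s).length - 1)) 95
          = (95 : Int) ^ ((d :: s).length - 1) := by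
        have h1 : (c :: d :: s).length - 1 = ((d :: s).length - 1) + 1 := by simp
        rw [h1, pow_succ, PySem.Int.floordiv_eq_ediv_of_pos (by norm_num)]
        exact Int.mul_ediv_cancel _ (by norm_num)
      rw [List.foldl_cons, hp, ih]
      have h2 : (c :: d :: s).length - 1 = s.length + 1 := by simp
      rw [h2]
      simp only [pvVal, List.length_cons]
      ring

-- ===== VERDICT (by name: the statement is the Claim_ definition above) =====
theorem b95decode_spec : Claim_equal_b95decode := by
  intro data _ hpre
  unfold Spec_b95decode b95decode b95decode_alt
  have hall : data.all (fun c => decide (32 ≤ c ∧ c < 127)) = true := by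
    simp only [List.all_eq_true, decide_eq_true_eq]
    exact hpre
  rw [if_pos hall, b95decodeAux_eq data 0 hpre]
  cases data with
  | nil => simp [pvVal]
  | cons c r =>
    simp only [List.isEmpty_cons, Bool.false_eq_true, if_false, foldl_pow_eq, Option.getD_some]
    ring
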